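-- pv_equiv track=rewrite | github.com/cookienc/Java | 백준/src/baekjoon/Problem17140.py | functionR
-- ===== SOURCE A (Python) =====
-- from collections import defaultdict
--
-- def functionR(arr):
--     tmp = [[] for _ in range(len(arr))]
--     for r in range(len(arr)):
--         map_ = defaultdict(lambda: 0)
--         for c in range(len(arr[r])):
--             value = arr[r][c]
--             if value == 0:
--                 continue
--             map_[value] += 1
--         for k, v in sorted(map_.items(), key=lambda x: (x[1], x[0])):
--             tmp[r].append(k)
--             tmp[r].append(v)
--
--     maxLength = max(len(t) for t in tmp)
--     for t in tmp:
--         while len(t) < maxLength: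
--             t.append(0)
--
--     return tmp
-- ===== SOURCE B (Python) =====
-- from itertools import groupby
--
-- def functionR(arr):
--     rows = []
--     for row in arr:
--         pairs = [(v, len(list(g))) for v, g in groupby(sorted(x for x in row if x != 0))]
--         pairs.sort(key=lambda p: (p[1], p[0]))
--         rows.append([x for p in pairs for x in p])
--     maxLength = max(len(r) for r in rows)
--     return [r + [0] * (maxLength - len(r)) for r in rows]
-- ===== Notes on version B (the rewrite author's own statement) =====
-- stated objective: alternative
-- what changed: Per-row tallying by a defaultdict hash map over indices is replaced by filtering zeros, sorting the row and run-length encoding with itertools.groupby to get the (value,count) pairs, then sorting pairs by (count,value) and padding as before.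
-- outside the precondition, e.g. on functionR([]): A raises ValueError, B raises ValueError
import Mathlib
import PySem

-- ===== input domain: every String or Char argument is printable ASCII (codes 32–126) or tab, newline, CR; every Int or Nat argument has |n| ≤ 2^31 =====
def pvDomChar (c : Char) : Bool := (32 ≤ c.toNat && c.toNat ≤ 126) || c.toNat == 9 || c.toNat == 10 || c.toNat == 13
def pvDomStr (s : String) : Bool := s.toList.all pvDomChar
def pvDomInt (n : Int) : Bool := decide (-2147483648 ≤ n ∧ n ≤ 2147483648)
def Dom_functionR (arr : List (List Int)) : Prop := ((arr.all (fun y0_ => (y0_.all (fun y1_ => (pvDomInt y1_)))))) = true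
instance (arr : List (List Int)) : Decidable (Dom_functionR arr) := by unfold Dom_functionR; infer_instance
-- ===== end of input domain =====

-- B replaces A's per-row hash-map (defaultdict) tally by filter-zeros + sort + run-length grouping
-- (itertools.groupby); the (count,value)-sorted flattening and zero-padding are as in A.

-- ===== PORT A =====
-- one row of A: defaultdict tally over column indices, then sorted items by (count, value), appended k,v
def rowA (row : List Int) : List Int :=
  let map_ := (PySem.List.pyRange 0 (PySem.List.len row)).foldl
    (fun d c =>
      let value := PySem.List.pyGetD row c 0
      if value = 0 then d else d.modify value (0 : Int) (· + 1))
    PySem.Dict.empty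
  (PySem.List.sorted2 map_.items (fun x => x.2) (fun x => x.1)).foldl
    (fun acc kv => (acc ++ [kv.1]) ++ [kv.2]) []

def functionR (arr : List (List Int)) : List (List Int) :=
  let tmp := (PySem.List.pyRange 0 (PySem.List.len arr)).map
    (fun r => rowA (PySem.List.pyGetD arr r []))
  -- max(len(t) for t in tmp): Python raises ValueError on empty tmp; Pre_ excludes arr = []
  let maxLength := (PySem.List.max? (tmp.map (fun t => PySem.List.len t)) (fun y => y)).getD 0
  -- 'while len(t) < maxLength: t.append(0)' appends exactly (maxLength - len t) zeros
  tmp.map (fun t => t ++ List.replicate (maxLength - PySem.List.len t).toNat 0)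

-- ===== PORT B =====
-- itertools.groupby over a sorted list: successive runs as (value, run length) pairs
def runLength (s : List Int) : List (Int × Int) :=
  match s with
  | [] => []
  | x :: xs =>
      (x, ((xs.takeWhile (· == x)).length + 1 : Int)) :: runLength (xs.dropWhile (· == x))
termination_by s.length
decreasing_by
  simpa using Nat.lt_succ_of_le (List.length_dropWhile_le _ _)

def rowB (row : List Int) : List Int :=
  let pairs := runLength (PySem.List.sorted (row.filter (fun x => decide ¬(x = 0))) (fun x => x))
  (PySem.List.sorted2 pairs (fun p => p.2) (fun p => p.1)).flatMap (fun p => [p.1, p.2])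

def functionR_alt (arr : List (List Int)) : List (List Int) :=
  let rows := arr.map rowB
  let maxLength := rows.foldl (fun m r => max m r.length) 0
  rows.map (fun r => r ++ List.replicate (maxLength - r.length) 0)

-- ===== PRECONDITION & SPEC =====
-- Pre_ excludes only arr = [], on which A's max() over an empty generator raises ValueError (B raises too).
def Pre_functionR (arr : List (List Int)) : Prop := arr ≠ []
instance (arr : List (List Int)) : Decidable (Pre_functionR arr) := by unfold Pre_functionR; infer_instance
def pvWitness_functionR : List (List Int) := [[1, 2, 1, 0], [0, 0, 3]]

def Spec_functionR (arr : List (List Int)) (out : List (List Int)) : Prop := out = functionR_alt arr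
instance (arr : List (List Int)) (out : List (List Int)) : Decidable (Spec_functionR arr out) := by unfold Spec_functionR; infer_instance

-- ===== CLAIM (what is proved, stated in full; the proofs are below) =====
def Claim_equal_functionR : Prop := ∀ (arr : List (List Int)), Dom_functionR arr → Pre_functionR arr → Spec_functionR arr (functionR arr)

-- ===== LEMMAS AND PROOFS =====

-- the Bool "before" relation sorted2 with keys (·.2, ·.1) sorts by, and its nonstrict Prop companion
def myLt (a b : Int × Int) : Bool :=
  decide (a.2 < b.2) || (!decide (b.2 < a.2) && decide (a.1 < b.1))

def myLe (a b : Int × Int) : Prop := a.2 < b.2 ∨ (a.2 = b.2 ∧ a.1 ≤ b.1)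

theorem myLe_iff (a b : Int × Int) : myLe a b ↔ myLt b a = false := by
  simp [myLe, myLt]; omega

theorem myLe_trans {a b c : Int × Int} (h1 : myLe a b) (h2 : myLe b c) : myLe a c := by
  simp only [myLe] at *; omega

theorem myLe_antisymm {a b : Int × Int} (h1 : myLe a b) (h2 : myLe b a) : a = b := by
  have : a.1 = b.1 ∧ a.2 = b.2 := by simp only [myLe] at *; omega
  exact Prod.ext this.1 this.2

theorem pairwise_insertBy (x : Int × Int) (acc : List (Int × Int))
    (h : acc.Pairwise myLe) : (PySem.List.insertBy myLt x acc).Pairwise myLe := by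
  induction acc with
  | nil => simp [PySem.List.insertBy]
  | cons y ys ih =>
    rw [List.pairwise_cons] at h
    by_cases hx : myLt x y = true
    · rw [PySem.List.insertBy]
      simp only [hx, if_true]
      have hxy : myLe x y := by
        rw [myLe_iff]; simp [myLt] at hx ⊢; omega
      refine List.Pairwise.cons ?_ (List.Pairwise.cons h.1 h.2)
      intro z hz
      rcases List.mem_cons.mp hz with h' | hz'
      · exact h' ▸ hxy
      · exact myLe_trans hxy (h.1 z hz')
    · rw [PySem.List.insertBy]
      simp only [hx]
      refine List.Pairwise.cons ?_ (ih h.2)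
      intro z hz
      rw [PySem.List.mem_insertBy] at hz
      rcases hz with rfl | hz
      · rw [myLe_iff]; simpa using hx
      · exact h.1 z hz

theorem pairwise_sorted2 (xs : List (Int × Int)) :
    (PySem.List.sorted2 xs (fun p => p.2) (fun p => p.1)).Pairwise myLe := by
  show (xs.foldl (fun acc x => PySem.List.insertBy myLt x acc) []).Pairwise myLe
  have key : ∀ (l acc : List (Int × Int)), acc.Pairwise myLe →
      (l.foldl (fun acc x => PySem.List.insertBy myLt x acc) acc).Pairwise myLe := by
    intro l
    induction l with
    | nil => exact fun acc h => h
    | cons a l ih => exact fun acc h => ih _ (pairwise_insertBy a acc h)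
  exact key xs [] (by simp)

theorem sorted2_eq_of_perm (xs ys : List (Int × Int)) (h : xs.Perm ys) :
    PySem.List.sorted2 xs (fun p => p.2) (fun p => p.1) =
    PySem.List.sorted2 ys (fun p => p.2) (fun p => p.1) := by
  refine List.Perm.eq_of_pairwise (fun a b _ _ h1 h2 => myLe_antisymm h1 h2)
    (pairwise_sorted2 xs) (pairwise_sorted2 ys) ?_
  exact ((PySem.List.sorted2_perm xs _ _ false).trans h).trans (PySem.List.sorted2_perm ys _ _ false).symm

theorem runLength_spec : ∀ (s : List Int), s.Pairwise (· ≤ ·) →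
    ∃ ks : List Int, ks.Nodup ∧ (∀ k, k ∈ ks ↔ k ∈ s) ∧
      runLength s = ks.map (fun k => (k, (s.count k : Int))) := by
  intro s
  induction s using runLength.induct with
  | case1 => exact fun _ => ⟨[], by simp [runLength]⟩
  | case2 x xs ih =>
    intro hpw
    have hsplit : xs.takeWhile (· == x) ++ xs.dropWhile (· == x) = xs :=
      List.takeWhile_append_dropWhile
    have hrunx : ∀ y ∈ xs.takeWhile (· == x), y = x := by
      intro y hy; simpa using List.mem_takeWhile_imp hy
    have hpw_xs : xs.Pairwise (· ≤ ·) := (List.pairwise_cons.mp hpw).2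
    have hx_le : ∀ y ∈ xs, x ≤ y := (List.pairwise_cons.mp hpw).1
    have hpw_rest : (xs.dropWhile (· == x)).Pairwise (· ≤ ·) :=
      hpw_xs.sublist (List.dropWhile_sublist _)
    have hrest_ne : ∀ z ∈ xs.dropWhile (· == x), z ≠ x := by
      rcases hh : xs.dropWhile (· == x) with _ | ⟨h, t⟩
      · simp
      · have hhd : (h == x) = false := by
          have := List.head?_dropWhile_not (· == x) xs
          rw [hh] at this; simpa using this
        have hhx : x < h := by
          have h1 : x ≤ h := hx_le h ((List.dropWhile_sublist _).mem (by rw [hh]; simp))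
          have h2 : h ≠ x := by simpa using hhd
          omega
        intro z hz
        rcases List.mem_cons.mp hz with rfl | hz'
        · omega
        · have : h ≤ z := by
            rw [hh] at hpw_rest
            exact (List.pairwise_cons.mp hpw_rest).1 z hz'
          omega
    obtain ⟨ks', hnd', hmem', heq'⟩ := ih hpw_rest
    refine ⟨x :: ks', ?_, ?_, ?_⟩
    · exact List.nodup_cons.mpr ⟨fun hx => hrest_ne x ((hmem' x).mp hx) rfl, hnd'⟩
    · intro k
      constructor
      · intro hk
        rcases List.mem_cons.mp hk with rfl | hk'
        · simp
        · exact List.mem_cons.mpr (Or.inr ((List.dropWhile_sublist _).mem ((hmem' k).mp hk')))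
      · intro hk
        rcases List.mem_cons.mp hk with rfl | hk'
        · simp
        · rw [← hsplit] at hk'
          rcases List.mem_append.mp hk' with hk'' | hk''
          · simp [hrunx k hk'']
          · exact List.mem_cons.mpr (Or.inr ((hmem' k).mpr hk''))
    · rw [runLength]
      have hcx : (x :: xs).count x = (xs.takeWhile (· == x)).length + 1 := by
        have h1 : (xs.takeWhile (· == x)).count x = (xs.takeWhile (· == x)).length := by
          rw [List.count_eq_length]; intro b hb; exact (hrunx b hb).symm
        have h2 : (xs.dropWhile (· == x)).count x = 0 :=
          List.count_eq_zero.mpr (fun h => hrest_ne x h rfl)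
        have h3 := congrArg (List.count x) hsplit
        rw [List.count_append, h1, h2] at h3
        rw [List.count_cons_self, ← h3]
      have hck : ∀ k ∈ ks', (x :: xs).count k = (xs.dropWhile (· == x)).count k := by
        intro k hk
        have hkx : k ≠ x := fun h => hrest_ne k ((hmem' k).mp hk) h
        have h1 : (xs.takeWhile (· == x)).count k = 0 :=
          List.count_eq_zero.mpr (fun h => hkx (hrunx k h))
        have h3 := congrArg (List.count k) hsplit
        rw [List.count_append, h1] at h3
        rw [List.count_cons, ← h3]
        simp [hkx.symm]
      rw [heq']
      simp only [List.map_cons]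
      congr 1
      · rw [hcx]; push_cast; ring_nf
      · apply List.map_congr_left
        intro k hk
        rw [hck k hk]

theorem perm_items_runLength (nz : List Int) :
    (PySem.Dict.counter nz).items.Perm
      (runLength (PySem.List.sorted nz (fun x => x))) := by
  obtain ⟨ks, hnd, hmem, heq⟩ := runLength_spec (PySem.List.sorted nz (fun x => x))
    (PySem.List.sorted_pairwise nz (fun x => x))
  rw [heq, PySem.Dict.items_counter]
  have hcnt : ∀ k : Int, (PySem.List.sorted nz (fun x => x)).count k = nz.count k :=
    fun k => (PySem.List.sorted_perm nz (fun x => x) false).count_eq k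
  have hperm : (PySem.Set.ofList nz).Perm ks := by
    rw [List.perm_ext_iff_of_nodup (PySem.Set.nodup_ofList nz) hnd]
    intro a
    rw [PySem.Set.mem_ofList, hmem a]
    exact ((PySem.List.sorted_perm nz (fun x => x) false).mem_iff).symm
  refine (hperm.map (fun k => (k, (nz.count k : Int)))).trans ?_
  apply List.Perm.of_eq
  apply List.map_congr_left
  intro k _
  rw [hcnt k]

theorem dict_eq (row : List Int) :
    (PySem.List.pyRange 0 (PySem.List.len row)).foldl
      (fun d c =>
        let value := PySem.List.pyGetD row c 0
        if value = 0 then d else d.modify value (0 : Int) (· + 1))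
      PySem.Dict.empty
    = PySem.Dict.counter (row.filter (fun x => decide ¬(x = 0))) := by
  have h1 :
      (PySem.List.pyRange 0 (PySem.List.len row)).foldl
        (fun d c =>
          let value := PySem.List.pyGetD row c 0
          if value = 0 then d else d.modify value (0 : Int) (· + 1))
        PySem.Dict.empty
      = (((PySem.List.pyRange 0 (PySem.List.len row)).map
            (fun c => PySem.List.pyGetD row c 0)).foldl
          (fun d v => if v = 0 then d else d.modify v (0 : Int) (· + 1))
          PySem.Dict.empty) := by
    exact (List.foldl_map
      (f := fun c => PySem.List.pyGetD row c 0)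
      (g := fun d (v : Int) => if v = 0 then d else d.modify v (0 : Int) (· + 1))
      (l := PySem.List.pyRange 0 (PySem.List.len row))
      (init := PySem.Dict.empty)).symm
  rw [h1, PySem.List.map_pyGetD_pyRange_zero]
  have h2 :
      row.foldl (fun d v => if v = 0 then d else d.modify v (0 : Int) (· + 1)) PySem.Dict.empty
      = row.foldl (fun d v => if ¬ v = 0 then d.modify v (0 : Int) (· + 1) else d) PySem.Dict.empty := by
    apply PySem.List.foldl_congr_mem
    intro acc v _
    by_cases h : v = 0 <;> simp [h]
  rw [h2, PySem.List.foldl_ite_eq_foldl_filter (p := fun v : Int => ¬ v = 0),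
      PySem.Dict.counter_eq_foldl]

theorem rowA_eq_rowB (row : List Int) : rowA row = rowB row := by
  unfold rowA rowB
  dsimp only
  rw [dict_eq row]
  rw [sorted2_eq_of_perm _ _ (perm_items_runLength (row.filter (fun x => decide ¬(x = 0))))]
  generalize PySem.List.sorted2
      (runLength (PySem.List.sorted (row.filter (fun x => decide ¬(x = 0))) (fun x => x)))
      (fun p => p.2) (fun p => p.1) = L
  have hc : L.foldl (fun acc kv => (acc ++ [kv.1]) ++ [kv.2]) ([] : List Int)
      = L.foldl (fun acc kv => acc ++ [kv.1, kv.2]) ([] : List Int) :=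
    PySem.List.foldl_congr_mem L _ _ [] (fun acc kv _ => by simp)
  rw [hc, PySem.List.foldl_append_eq_flatMap]
  simp

-- A's Int running max over the lengths equals the cast of B's Nat running max
theorem fold_max_cast (ls : List (List Int)) (a : Nat) :
    (ls.map (fun t => (t.length : Int))).foldl max ((a : Nat) : Int)
      = ((ls.foldl (fun m t => max m t.length) a : Nat) : Int) := by
  induction ls generalizing a with
  | nil => simp
  | cons t ts ih =>
    simp only [List.map_cons, List.foldl_cons]
    rw [← Nat.cast_max, ih (max a t.length)]

theorem functionR_eq (arr : List (List Int)) (h : arr ≠ []) :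
    functionR arr = functionR_alt arr := by
  unfold functionR functionR_alt
  dsimp only
  have htmp : (PySem.List.pyRange 0 (PySem.List.len arr)).map
      (fun r => rowA (PySem.List.pyGetD arr r [])) = arr.map rowB := by
    rw [show (fun r => rowA (PySem.List.pyGetD arr r []))
          = rowA ∘ (fun j => PySem.List.pyGetD arr j []) from rfl]
    rw [← List.map_map, PySem.List.map_pyGetD_pyRange_zero]
    exact List.map_congr_left (fun t _ => rowA_eq_rowB t)
  rw [htmp]
  rcases hr : arr.map rowB with _ | ⟨t0, ts⟩
  · exact absurd (List.map_eq_nil_iff.mp hr) h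
  · have hmax :
        (PySem.List.max? ((t0 :: ts).map (fun t => PySem.List.len t)) (fun y => y)).getD 0
          = (((t0 :: ts).foldl (fun m r => max m r.length) 0 : Nat) : Int) := by
      rw [show ((t0 :: ts).map (fun t => PySem.List.len t))
            = (t0 :: ts).map (fun t => (t.length : Int)) by simp [PySem.List.len_eq]]
      rw [List.map_cons, PySem.List.max?_id_cons, Option.getD_some,
          fold_max_cast ts t0.length]
      simp
    rw [hmax]
    apply List.map_congr_left
    intro t _
    rw [PySem.List.len_eq, Int.toNat_sub]

-- ===== VERDICT (by name: the statement is the Claim_ definition above) =====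
theorem functionR_spec : Claim_equal_functionR := by
  intro arr _ hpre
  unfold Spec_functionR
  exact functionR_eq arr hpre
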